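-- pv_equiv track=rewrite | github.com/faint/navieBayes | navie_bayes.py | count_conditional
-- ===== SOURCE A (Python) =====
-- def get_field_category(line: []) -> int:
--     """
--     分类在数组的倒数第一个元素
--     :param line:  line
--     :return: int
--     """
--     return len(line) - 1
--
-- def count_conditional(lines: []) -> {}:
--     """
--     计数条件数量（后验）
--     :param lines: []
--     :return:  result: {}
--
--     result 格式:
--     {'<=50K': [ {'39': 538, '50': 341, ......}, {'State-gov': 945, 'Self-emp-not-inc': 1817, ......}, ......] }
--     {'>50K': [ {'39': 538, '50': 341, ......}, {'State-gov': 945, 'Self-emp-not-inc': 1817, ......}, ......] }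
--     """
--     result = {}
--
--     # 获取分类在数组的索引
--     field_category = get_field_category(lines[0])
--
--     for line in lines:
--         result.setdefault(line[field_category], {})
--         for column in range(len(line) - 1):
--             result[line[field_category]].setdefault(column, {})
--             result[line[field_category]][column].setdefault(line[column], 0)
--             result[line[field_category]][column][line[column]] += 1
--
--     return result
-- ===== SOURCE B (Python) =====
-- def count_conditional(lines):
--     field_category = len(lines[0]) - 1
--     # single pass: partition rows into per-class buckets (insertion order kept)
--     buckets = {}
--     for line in lines:
--         buckets.setdefault(line[field_category], []).append(line)
--     # per class, count column-major: one counter dict per column index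
--     result = {}
--     for cls, rows in buckets.items():
--         m = max(len(row) - 1 for row in rows)
--         cols = {}
--         for c in range(m):
--             counter = {}
--             for row in rows:
--                 if c < len(row) - 1:
--                     v = row[c]
--                     counter[v] = counter.get(v, 0) + 1
--             cols[c] = counter
--         result[cls] = cols
--     return result
-- ===== Notes on version B (the rewrite author's own statement) =====
-- stated objective: alternative
-- what changed: B first partitions the rows into per-class buckets in one pass and then counts each class column-major (one counter per column index over that class's rows), instead of A's row-major walk that repeatedly navigates a triple-nested dict with setdefault for every cell.
import Mathlib
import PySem

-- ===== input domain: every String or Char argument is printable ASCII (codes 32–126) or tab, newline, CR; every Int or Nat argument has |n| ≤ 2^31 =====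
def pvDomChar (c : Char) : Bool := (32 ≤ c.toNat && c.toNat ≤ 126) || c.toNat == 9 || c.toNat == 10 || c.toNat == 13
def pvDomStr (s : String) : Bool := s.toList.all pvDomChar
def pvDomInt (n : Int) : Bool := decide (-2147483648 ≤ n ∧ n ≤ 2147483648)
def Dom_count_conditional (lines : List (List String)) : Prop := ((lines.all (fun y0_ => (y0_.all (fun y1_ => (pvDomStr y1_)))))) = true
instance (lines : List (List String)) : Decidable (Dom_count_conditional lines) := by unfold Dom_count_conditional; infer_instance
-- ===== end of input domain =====

-- B partitions rows into per-class buckets in one pass and then counts column-major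
-- (one counter per column over each class's rows), instead of A's row-major walk
-- through a triple-nested dict; same cost, different decomposition (objective: alternative).

-- ===== PORT A =====
def get_field_category (line : List String) : Int := (line.length : Int) - 1

def count_conditional (lines : List (List String)) : List (String × List (Int × List (String × Int))) :=
  -- lines[0] raises IndexError on []: excluded by Pre_
  let field_category : Int := get_field_category (PySem.List.pyGetD lines 0 [])
  let result : PySem.Dict String (PySem.Dict Int (PySem.Dict String Int)) :=
    lines.foldl (fun result line =>
      -- line[field_category]; in range under Pre_ (pyGetD's default is never used there)
      let key := PySem.List.pyGetD line field_category ""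
      -- result.setdefault(line[field_category], {})
      let result := result.setdefault key PySem.Dict.empty
      (PySem.List.pyRange 0 ((line.length : Int) - 1) 1).foldl (fun result column =>
        -- result[line[field_category]].setdefault(column, {})   (key is present, so modify's default is never used)
        let result := result.modify key PySem.Dict.empty
          (fun inner => inner.setdefault column PySem.Dict.empty)
        -- result[line[field_category]][column].setdefault(line[column], 0)
        let result := result.modify key PySem.Dict.empty
          (fun inner => inner.modify column PySem.Dict.empty
            (fun cnt => cnt.setdefault (PySem.List.pyGetD line column "") 0))
        -- result[line[field_category]][column][line[column]] += 1
        result.modify key PySem.Dict.empty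
          (fun inner => inner.modify column PySem.Dict.empty
            (fun cnt => cnt.modify (PySem.List.pyGetD line column "") 0 (· + 1)))
      ) result
    ) PySem.Dict.empty
  -- dict-of-dict-of-dict rendered as the association lists of the type convention
  result.items.map (fun p => (p.1, p.2.items.map (fun q => (q.1, q.2.items))))

-- ===== PORT B =====
def count_conditional_alt (lines : List (List String)) : List (String × List (Int × List (String × Int))) :=
  let field_category : Int := ((PySem.List.pyGetD lines 0 []).length : Int) - 1
  -- buckets.setdefault(line[field_category], []).append(line)
  let buckets : PySem.Dict String (List (List String)) :=
    lines.foldl (fun b line =>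
      b.modify (PySem.List.pyGetD line field_category "") [] (fun rows => rows ++ [line]))
      PySem.Dict.empty
  buckets.items.map (fun p =>
    let rows := p.2
    -- m = max(len(row) - 1 for row in rows); rows is never empty, so the default is never used
    let m : Int := (PySem.List.max? (rows.map (fun row => (row.length : Int) - 1)) (fun y => y)).getD 0
    (p.1, (PySem.List.pyRange 0 m 1).map (fun c =>
      (c, (rows.foldl (fun cnt row =>
              if c < (row.length : Int) - 1 then
                -- counter[v] = counter.get(v, 0) + 1
                cnt.modify (PySem.List.pyGetD row c "") 0 (· + 1)
              else cnt)
            (PySem.Dict.empty : PySem.Dict String Int)).items))))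

-- ===== PRECONDITION & SPEC =====
-- Pre_ excludes exactly the inputs on which A raises IndexError: the empty list (lines[0]),
-- an empty first row (line[-1] of an empty row), and any row shorter than the first row
-- (line[field_category] out of range). A returns normally on every other input.
def Pre_count_conditional (lines : List (List String)) : Prop :=
  lines.headI ≠ [] ∧ ∀ l ∈ lines, lines.headI.length ≤ l.length
instance (lines : List (List String)) : Decidable (Pre_count_conditional lines) := by
  unfold Pre_count_conditional; infer_instance

def pvWitness_count_conditional : List (List String) :=
  [["39", "State-gov", "<=50K"], ["50", "Self-emp", ">50K"], ["39", "State-gov", "<=50K"]]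

def Spec_count_conditional (lines : List (List String)) (out : List (String × List (Int × List (String × Int)))) : Prop := out = count_conditional_alt lines
instance (lines : List (List String)) (out : List (String × List (Int × List (String × Int)))) : Decidable (Spec_count_conditional lines out) := by unfold Spec_count_conditional; infer_instance

-- ===== CLAIM (what is proved, stated in full; the proofs are below) =====
def Claim_equal_count_conditional : Prop := ∀ (lines : List (List String)), Dom_count_conditional lines → Pre_count_conditional lines → Spec_count_conditional lines (count_conditional lines)

-- ===== LEMMAS AND PROOFS =====

-- canonical (collapsed) forms of A's per-line update, used only by the proofs
def pvClsOf (fc : Int) (line : List String) : String := PySem.List.pyGetD line fc ""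

def pvColUpd (line : List String) (c : Int) (cnt : PySem.Dict String Int) : PySem.Dict String Int :=
  cnt.modify (PySem.List.pyGetD line c "") 0 (· + 1)

def pvLineUpd (line : List String) (inner : PySem.Dict Int (PySem.Dict String Int)) :
    PySem.Dict Int (PySem.Dict String Int) :=
  (PySem.List.pyRange 0 ((line.length : Int) - 1) 1).foldl
    (fun inner c => inner.modify c PySem.Dict.empty (pvColUpd line c)) inner

-- C1: a setdefault immediately followed by a modify at the same key collapses
theorem pv_setdefault_modify {κ ν : Type} [BEq κ] [LawfulBEq κ]
    (d : PySem.Dict κ ν) (k : κ) (d0 : ν) (f : ν → ν) :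
    (d.setdefault k d0).modify k d0 f = d.modify k d0 f := by
  by_cases hc : d.contains k = true
  · rw [PySem.Dict.setdefault_of_contains d d0 hc]
  · have hc' : d.contains k = false := by simp_all
    rw [PySem.Dict.setdefault_of_not_contains d d0 hc']
    simp only [PySem.Dict.modify, PySem.Dict.getD_insert_self, PySem.Dict.insert_insert_self,
      PySem.Dict.getD_of_not_contains d d0 hc']

-- C2: two modifies at the same key compose
theorem pv_modify_modify {κ ν : Type} [BEq κ] [LawfulBEq κ]
    (d : PySem.Dict κ ν) (k : κ) (d0 : ν) (f g : ν → ν) :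
    (d.modify k d0 f).modify k d0 g = d.modify k d0 (fun x => g (f x)) := by
  simp only [PySem.Dict.modify, PySem.Dict.getD_insert_self, PySem.Dict.insert_insert_self]

-- inserting back the value already stored changes nothing (unique keys)
theorem pv_insert_getD_self {κ ν : Type} [BEq κ] [LawfulBEq κ]
    (d : PySem.Dict κ ν) (k : κ) (d0 : ν) (hnd : d.keys.Nodup) (hc : d.contains k = true) :
    d.insert k (d.getD k d0) = d := by
  apply PySem.Dict.ext
  rw [PySem.Dict.items_insert_of_contains d _ hc]
  conv_rhs => rw [← List.map_id d.items]
  apply List.map_congr_left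
  intro p hp
  by_cases hpk : p.1 = k
  · have hmem : (k, p.2) ∈ d.items := by rw [← hpk]; exact hp
    have hget : d.get? k = some p.2 := PySem.Dict.get?_of_mem_items d hmem hnd
    have : d.getD k d0 = p.2 := by simp [PySem.Dict.getD, hget]
    simp [hpk, this]
    exact (Prod.ext hpk.symm rfl)
  · simp [hpk]

-- C3: on a dict with unique keys, setdefault is modify with the identity
theorem pv_setdefault_eq_modify_id {κ ν : Type} [BEq κ] [LawfulBEq κ]
    (d : PySem.Dict κ ν) (k : κ) (d0 : ν) (hnd : d.keys.Nodup) :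
    d.setdefault k d0 = d.modify k d0 (fun x => x) := by
  by_cases hc : d.contains k = true
  · rw [PySem.Dict.setdefault_of_contains d d0 hc]
    simp only [PySem.Dict.modify]
    exact (pv_insert_getD_self d k d0 hnd hc).symm
  · have hc' : d.contains k = false := by simp_all
    rw [PySem.Dict.setdefault_of_not_contains d d0 hc']
    simp only [PySem.Dict.modify, PySem.Dict.getD_of_not_contains d d0 hc']

-- N1: modify keeps keys unique
theorem pv_nodup_keys_modify {κ ν : Type} [BEq κ] [LawfulBEq κ]
    (d : PySem.Dict κ ν) (k : κ) (d0 : ν) (f : ν → ν) (hnd : d.keys.Nodup) :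
    (d.modify k d0 f).keys.Nodup := by
  have h := PySem.Dict.nodup_keys_foldl_modify_key [()] (fun _ => k) d0 (fun _ _ => f) d hnd
  simpa using h

-- L2: a chain of modifies at one key is one modify by the folded function
theorem pv_foldl_modify_same_key {κ ν β : Type} [BEq κ] [LawfulBEq κ]
    (cs : List β) (k : κ) (d0 : ν) (g : β → ν → ν) (d : PySem.Dict κ ν) (f : ν → ν) :
    cs.foldl (fun d c => d.modify k d0 (g c)) (d.modify k d0 f)
      = d.modify k d0 (fun x => cs.foldl (fun y c => g c y) (f x)) := by
  induction cs generalizing f with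
  | nil => simp
  | cons c t ih =>
    simp only [List.foldl_cons]
    rw [pv_modify_modify]
    exact ih (fun x => g c (f x))

-- G1: lookup after a keyed modify-fold sees exactly the matching updates
theorem pv_getD_foldl_modify {κ ν β : Type} [BEq κ] [LawfulBEq κ] [DecidableEq κ]
    (l : List β) (key : β → κ) (d0 : ν) (u : β → ν → ν) (d : PySem.Dict κ ν) (c : κ) :
    (l.foldl (fun d x => d.modify (key x) d0 (u x)) d).getD c d0
      = (l.filter (fun x => key x == c)).foldl (fun v x => u x v) (d.getD c d0) := by
  induction l generalizing d with
  | nil => simp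
  | cons x t ih =>
    simp only [List.foldl_cons, List.filter_cons]
    by_cases h : key x = c
    · subst h
      simp only [BEq.rfl, if_true]
      rw [ih, List.foldl_cons]
      congr 1
      rw [PySem.Dict.getD_modify]
      simp
    · have hb : (key x == c) = false := by simp [h]
      have hcc : ¬ (c = key x) := fun hh => h hh.symm
      simp only [hb, Bool.false_eq_true, if_false]
      rw [ih]
      congr 1
      rw [PySem.Dict.getD_modify]
      simp [hcc]

-- G2: the items of a keyed modify-fold from empty, grouped by key
theorem pv_items_foldl_modify {κ ν β : Type} [BEq κ] [LawfulBEq κ] [DecidableEq κ]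
    (l : List β) (key : β → κ) (d0 : ν) (u : β → ν → ν) :
    (l.foldl (fun d x => d.modify (key x) d0 (u x)) PySem.Dict.empty).items
      = (PySem.Set.ofList (l.map key)).map
          (fun c => (c, (l.filter (fun x => key x == c)).foldl (fun v x => u x v) d0)) := by
  have hnd : ((l.foldl (fun d x => d.modify (key x) d0 (u x)) PySem.Dict.empty)).keys.Nodup :=
    PySem.Dict.nodup_keys_foldl_modify_key l key d0 (fun _ x => u x) PySem.Dict.empty
      PySem.Dict.nodup_keys_empty
  rw [PySem.Dict.items_eq_map_keys _ hnd d0]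
  have hkeys : ((l.foldl (fun d x => d.modify (key x) d0 (u x)) PySem.Dict.empty)).keys
      = PySem.Set.ofList (l.map key) :=
    PySem.Dict.keys_foldl_modify_key l key d0 (fun _ x => u x) PySem.Dict.empty
  rw [hkeys]
  apply List.map_congr_left
  intro c hc
  rw [pv_getD_foldl_modify]
  simp [PySem.Dict.getD_empty]

-- a nested fold is a fold over the flattened (element, index) pairs
theorem pv_foldl_nested {α β γ : Type} (l : List α) (g : α → List β) (h : α → β → γ → γ) (init : γ) :
    l.foldl (fun acc x => (g x).foldl (fun acc y => h x y acc) acc) init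
      = (l.flatMap (fun x => (g x).map (fun y => (x, y)))).foldl (fun acc p => h p.1 p.2 acc) init := by
  induction l generalizing init with
  | nil => simp
  | cons x t ih =>
    simp only [List.foldl_cons, List.flatMap_cons, List.foldl_append, List.foldl_map]
    exact ih _

-- updating a set with elements it already has changes nothing
theorem pv_update_subset {α : Type} [BEq α] [LawfulBEq α] (s : PySem.Set α) (xs : List α)
    (h : ∀ x ∈ xs, x ∈ s) : PySem.Set.update s xs = s := by
  induction xs generalizing s with
  | nil => rfl
  | cons x t ih =>
    have hmx : x ∈ s := h x (List.mem_cons.mpr (Or.inl rfl))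
    have hx : List.contains s x = true := List.contains_iff_mem.mpr hmx
    have hadd : PySem.Set.add s x = s := by
      simp only [PySem.Set.add, PySem.Set.contains, hx]
      simp
    have hstep : PySem.Set.update s (x :: t) = PySem.Set.update s t := by
      simp [PySem.Set.update, hadd]
    rw [hstep]
    exact ih s (fun y hy => h y (by simp [hy]))

-- updating a set with fresh, duplicate-free elements appends them
theorem pv_update_fresh {α : Type} [BEq α] [LawfulBEq α] (s : PySem.Set α) (xs : List α)
    (hnd : xs.Nodup) (h : ∀ x ∈ xs, x ∉ s) : PySem.Set.update s xs = s ++ xs := by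
  induction xs generalizing s with
  | nil => simp [PySem.Set.update]
  | cons x t ih =>
    have hmx : x ∉ s := h x (List.mem_cons.mpr (Or.inl rfl))
    have hx : List.contains s x = false := by
      rw [Bool.eq_false_iff]
      intro hcon
      exact hmx (List.contains_iff_mem.mp hcon)
    have hadd : PySem.Set.add s x = s ++ [x] := by
      simp only [PySem.Set.add, PySem.Set.contains, hx]
      simp
    have hstep : PySem.Set.update s (x :: t) = PySem.Set.update (s ++ [x]) t := by
      simp [PySem.Set.update, hadd]
    rw [hstep]
    rw [ih (s ++ [x]) (List.nodup_cons.mp hnd).2 ?_]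
    · simp
    · intro y hy hmem
      rcases List.mem_append.mp hmem with hys | hyx
      · exact h y (by simp [hy]) hys
      · have : y = x := by simpa using hyx
        exact (List.nodup_cons.mp hnd).1 (this ▸ hy)

-- pyRange 0 k 1 for 0 ≤ k, as a mapped Nat range
theorem pv_pyRange_nonneg (k : Int) (hk : 0 ≤ k) :
    PySem.List.pyRange 0 k 1 = List.map (fun n : Nat => (n : Int)) (List.range k.toNat) := by
  have h := PySem.List.pyRange_zero_natCast k.toNat
  rw [Int.toNat_of_nonneg hk] at h
  exact h

theorem pv_nodup_pyRange (k : Int) : (PySem.List.pyRange 0 k 1).Nodup := by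
  by_cases hk : 0 ≤ k
  · rw [pv_pyRange_nonneg k hk]
    exact List.nodup_range.map (fun a b hab => by exact_mod_cast hab)
  · have hnil : PySem.List.pyRange 0 k 1 = [] := by
      apply List.eq_nil_iff_forall_not_mem.mpr
      intro x hx
      have := PySem.List.mem_pyRange_one.mp hx
      omega
    simp [hnil]

-- L4a: union of two prefixes [0,K) and [0,k) is the prefix to the max
theorem pv_update_range_range (K k : Int) (hK : 0 ≤ K) (hk : 0 ≤ k) :
    PySem.Set.update (PySem.List.pyRange 0 K 1) (PySem.List.pyRange 0 k 1)
      = PySem.List.pyRange 0 (max K k) 1 := by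
  rcases le_total k K with h | h
  · rw [max_eq_left h]
    apply pv_update_subset
    intro x hx
    have h1 := PySem.List.mem_pyRange_one.mp hx
    exact PySem.List.mem_pyRange_one.mpr ⟨h1.1, lt_of_lt_of_le h1.2 h⟩
  · rw [max_eq_right h]
    rw [pv_pyRange_nonneg K hK, pv_pyRange_nonneg k hk]
    have hsplit : k.toNat = K.toNat + (k.toNat - K.toNat) := by omega
    rw [hsplit, List.range_add, List.map_append]
    have hupd : ∀ (s : PySem.Set Int) (xs ys : List Int),
        PySem.Set.update s (xs ++ ys) = PySem.Set.update (PySem.Set.update s xs) ys := by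
      intro s xs ys; simp [PySem.Set.update, List.foldl_append]
    rw [hupd]
    rw [pv_update_subset _ _ (fun x hx => hx)]
    rw [pv_update_fresh]
    · refine List.Nodup.map (fun a b hab => by exact_mod_cast hab) ?_
      exact List.nodup_range.map (fun a b hab => by omega)
    · intro x hx hmem
      simp only [List.mem_map, List.mem_range] at hx hmem
      obtain ⟨n, ⟨i, hi, rfl⟩, rfl⟩ := hx
      obtain ⟨m, hm, hc⟩ := hmem
      omega

-- L4: the set of all column indices of the rows is the range to the max row width
theorem pv_ofList_flatMap_range (ks : List Int) (h : ∀ k ∈ ks, 0 ≤ k) :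
    PySem.Set.ofList (ks.flatMap (fun k => PySem.List.pyRange 0 k 1))
      = PySem.List.pyRange 0 (ks.foldl max 0) 1 := by
  have hupd : ∀ (s : PySem.Set Int) (xs ys : List Int),
      PySem.Set.update s (xs ++ ys) = PySem.Set.update (PySem.Set.update s xs) ys := by
    intro s xs ys; simp [PySem.Set.update, List.foldl_append]
  have H : ∀ (ks : List Int), (∀ k ∈ ks, 0 ≤ k) → ∀ (K : Int), 0 ≤ K →
      PySem.Set.update (PySem.List.pyRange 0 K 1) (ks.flatMap fun k => PySem.List.pyRange 0 k 1)
        = PySem.List.pyRange 0 (ks.foldl max K) 1 := by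
    intro ks
    induction ks with
    | nil => intro _ K hK; simp [PySem.Set.update]
    | cons k t ih =>
      intro hks K hK
      simp only [List.flatMap_cons, List.foldl_cons]
      rw [hupd]
      rw [pv_update_range_range K k hK (hks k (by simp))]
      exact ih (fun k2 hk2 => hks k2 (by simp [hk2])) _ (le_trans hK (le_max_left _ _))
  have h0 := H ks h 0 le_rfl
  have e1 : PySem.List.pyRange 0 0 1 = [] := rfl
  rw [e1] at h0
  exact h0

-- A's literal per-line body collapses to one modify at the class key
theorem pv_stepA_collapse (fc : Int) (line : List String)
    (d : PySem.Dict String (PySem.Dict Int (PySem.Dict String Int))) (hnd : d.keys.Nodup) :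
    (PySem.List.pyRange 0 ((line.length : Int) - 1) 1).foldl (fun result column =>
        ((result.modify (PySem.List.pyGetD line fc "") PySem.Dict.empty
            (fun inner => inner.setdefault column PySem.Dict.empty)).modify
              (PySem.List.pyGetD line fc "") PySem.Dict.empty
            (fun inner => inner.modify column PySem.Dict.empty
              (fun cnt => cnt.setdefault (PySem.List.pyGetD line column "") 0))).modify
              (PySem.List.pyGetD line fc "") PySem.Dict.empty
            (fun inner => inner.modify column PySem.Dict.empty
              (fun cnt => cnt.modify (PySem.List.pyGetD line column "") 0 (· + 1))))
      (d.setdefault (PySem.List.pyGetD line fc "") PySem.Dict.empty)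
    = d.modify (pvClsOf fc line) PySem.Dict.empty (pvLineUpd line) := by
  have hbody : (fun (result : PySem.Dict String (PySem.Dict Int (PySem.Dict String Int))) (column : Int) =>
        ((result.modify (PySem.List.pyGetD line fc "") PySem.Dict.empty
            (fun inner => inner.setdefault column PySem.Dict.empty)).modify
              (PySem.List.pyGetD line fc "") PySem.Dict.empty
            (fun inner => inner.modify column PySem.Dict.empty
              (fun cnt => cnt.setdefault (PySem.List.pyGetD line column "") 0))).modify
              (PySem.List.pyGetD line fc "") PySem.Dict.empty
            (fun inner => inner.modify column PySem.Dict.empty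
              (fun cnt => cnt.modify (PySem.List.pyGetD line column "") 0 (· + 1))))
      = (fun result column => result.modify (PySem.List.pyGetD line fc "") PySem.Dict.empty
            (fun inner => inner.modify column PySem.Dict.empty (pvColUpd line column))) := by
    funext result column
    rw [pv_modify_modify, pv_modify_modify]
    congr 1
    funext inner
    rw [pv_setdefault_modify, pv_modify_modify]
    congr 1
    funext cnt
    rw [pv_setdefault_modify]
    rfl
  simp only [pvClsOf]
  rw [hbody]
  rw [pv_setdefault_eq_modify_id d (PySem.List.pyGetD line fc "") PySem.Dict.empty hnd]
  rw [pv_foldl_modify_same_key]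
  rfl

-- A's whole accumulation loop in canonical form
theorem pv_foldA_canonical (fc : Int) (lines : List (List String))
    (d : PySem.Dict String (PySem.Dict Int (PySem.Dict String Int))) (hnd : d.keys.Nodup) :
    lines.foldl (fun result line =>
      (PySem.List.pyRange 0 ((line.length : Int) - 1) 1).foldl (fun result column =>
        ((result.modify (PySem.List.pyGetD line fc "") PySem.Dict.empty
            (fun inner => inner.setdefault column PySem.Dict.empty)).modify
              (PySem.List.pyGetD line fc "") PySem.Dict.empty
            (fun inner => inner.modify column PySem.Dict.empty
              (fun cnt => cnt.setdefault (PySem.List.pyGetD line column "") 0))).modify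
              (PySem.List.pyGetD line fc "") PySem.Dict.empty
            (fun inner => inner.modify column PySem.Dict.empty
              (fun cnt => cnt.modify (PySem.List.pyGetD line column "") 0 (· + 1))))
        (result.setdefault (PySem.List.pyGetD line fc "") PySem.Dict.empty)) d
    = lines.foldl (fun result line =>
        result.modify (pvClsOf fc line) PySem.Dict.empty (pvLineUpd line)) d := by
  induction lines generalizing d with
  | nil => rfl
  | cons line t ih =>
    simp only [List.foldl_cons]
    rw [pv_stepA_collapse fc line d hnd]
    exact ih _ (pv_nodup_keys_modify d _ _ _ hnd)

-- filtering a duplicate-free list for one value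
theorem pv_filter_beq_of_nodup {α : Type} [BEq α] [LawfulBEq α] (ds : List α) (c : α) (h : ds.Nodup) :
    ds.filter (fun d => d == c) = if c ∈ ds then [c] else [] := by
  induction ds with
  | nil => simp
  | cons d t ih =>
    obtain ⟨hd, ht⟩ := List.nodup_cons.mp h
    simp only [List.filter_cons]
    by_cases hdc : d = c
    · subst hdc
      simp [ih ht, hd]
    · have hb : (d == c) = false := by simp [hdc]
      have hcd : ¬ c = d := fun hh => hdc hh.symm
      simp [hb, ih ht, hcd]

-- the (row, column) pairs whose column is c, one per row that is wide enough
theorem pv_pairs_filter (rows : List (List String)) (c : Int) (hc : 0 ≤ c) :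
    (rows.flatMap (fun line => (PySem.List.pyRange 0 ((line.length : Int) - 1) 1).map (fun d => (line, d)))).filter
        (fun p => p.2 == c)
      = (rows.filter (fun row => decide (c < (row.length : Int) - 1))).map (fun row => (row, c)) := by
  induction rows with
  | nil => simp
  | cons row t ih =>
    simp only [List.flatMap_cons, List.filter_append, List.filter_cons, ih]
    have hfirst : ((PySem.List.pyRange 0 ((row.length : Int) - 1) 1).map (fun d => (row, d))).filter
          (fun p => p.2 == c)
        = if c < (row.length : Int) - 1 then [(row, c)] else [] := by
      rw [List.filter_map]
      have hcomp : ((fun p : List String × Int => p.2 == c) ∘ (fun d => (row, d))) = (fun d => d == c) := rfl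
      rw [hcomp, pv_filter_beq_of_nodup _ c (pv_nodup_pyRange _)]
      by_cases hlt : c < (row.length : Int) - 1
      · have hmem : c ∈ PySem.List.pyRange 0 ((row.length : Int) - 1) 1 :=
          PySem.List.mem_pyRange_one.mpr ⟨hc, hlt⟩
        simp [hmem, hlt]
      · have hmem : c ∉ PySem.List.pyRange 0 ((row.length : Int) - 1) 1 := fun hm =>
          hlt (PySem.List.mem_pyRange_one.mp hm).2
        simp [hmem, hlt]
    rw [hfirst]
    by_cases hlt : c < (row.length : Int) - 1 <;> simp [hlt]

-- per class: A's nested per-row counting equals B's column-major counting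
theorem pv_per_class (rows : List (List String)) (hne : rows ≠ [])
    (hlen : ∀ row ∈ rows, 1 ≤ row.length) :
    (rows.foldl (fun inner line => pvLineUpd line inner) PySem.Dict.empty).items.map
        (fun q => (q.1, q.2.items))
      = (PySem.List.pyRange 0
            ((PySem.List.max? (rows.map (fun row => (row.length : Int) - 1)) (fun y => y)).getD 0) 1).map
          (fun c => (c, (rows.foldl (fun cnt row =>
              if c < (row.length : Int) - 1 then
                cnt.modify (PySem.List.pyGetD row c "") 0 (· + 1)
              else cnt) (PySem.Dict.empty : PySem.Dict String Int)).items)) := by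
  have h1 : rows.foldl (fun inner line => pvLineUpd line inner) PySem.Dict.empty
      = (rows.flatMap (fun line => (PySem.List.pyRange 0 ((line.length : Int) - 1) 1).map (fun c => (line, c)))).foldl
          (fun inner p => inner.modify p.2 PySem.Dict.empty (pvColUpd p.1 p.2)) PySem.Dict.empty := by
    simp only [pvLineUpd]
    exact pv_foldl_nested rows (fun line => PySem.List.pyRange 0 ((line.length : Int) - 1) 1)
      (fun line c inner => inner.modify c PySem.Dict.empty (pvColUpd line c)) PySem.Dict.empty
  rw [h1]
  have h2 := pv_items_foldl_modify
    (rows.flatMap (fun line => (PySem.List.pyRange 0 ((line.length : Int) - 1) 1).map (fun c => (line, c))))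
    (fun p : List String × Int => p.2) PySem.Dict.empty (fun p => pvColUpd p.1 p.2)
  simp only [] at h2
  rw [h2]
  rw [List.map_map]
  have h3 : (rows.flatMap (fun line => (PySem.List.pyRange 0 ((line.length : Int) - 1) 1).map (fun c => (line, c)))).map
        (fun p => p.2)
      = rows.flatMap (fun row => PySem.List.pyRange 0 ((row.length : Int) - 1) 1) := by
    simp [List.map_flatMap, List.map_map, Function.comp_def]
  rw [h3]
  have hk0 : ∀ kk ∈ rows.map (fun row => (row.length : Int) - 1), 0 ≤ kk := by
    intro kk hkk
    obtain ⟨row, hrow, rfl⟩ := List.mem_map.mp hkk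
    have := hlen row hrow
    omega
  have h4 : PySem.Set.ofList (rows.flatMap (fun row => PySem.List.pyRange 0 ((row.length : Int) - 1) 1))
      = PySem.List.pyRange 0 ((rows.map (fun row => (row.length : Int) - 1)).foldl max 0) 1 := by
    rw [← List.flatMap_map (fun row => (row.length : Int) - 1) (fun kk => PySem.List.pyRange 0 kk 1) rows]
    exact pv_ofList_flatMap_range _ hk0
  rw [h4]
  obtain ⟨r0, rt, rfl⟩ : ∃ r0 rt, rows = r0 :: rt := by
    cases rows with
    | nil => exact absurd rfl hne
    | cons a b => exact ⟨a, b, rfl⟩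
  have h5 : (PySem.List.max? ((r0 :: rt).map (fun row => (row.length : Int) - 1)) (fun y => y)).getD 0
      = ((r0 :: rt).map (fun row => (row.length : Int) - 1)).foldl max 0 := by
    simp only [List.map_cons, List.foldl_cons]
    rw [PySem.List.max?_id_cons]
    simp only [Option.getD_some]
    have h00 : (0 : Int) ≤ (r0.length : Int) - 1 := by
      have := hlen r0 (by simp)
      omega
    rw [max_eq_right h00]
  rw [h5]
  apply List.map_congr_left
  intro c hc
  have hc0 : 0 ≤ c := (PySem.List.mem_pyRange_one.mp hc).1
  simp only [Function.comp_apply, Prod.mk.injEq]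
  refine ⟨by trivial, ?_⟩
  rw [pv_pairs_filter (r0 :: rt) c hc0]
  rw [List.foldl_map]
  rw [PySem.List.foldl_ite_eq_foldl_filter (fun row : List String => c < (row.length : Int) - 1)
    (fun cnt row => cnt.modify (PySem.List.pyGetD row c "") 0 (· + 1)) (r0 :: rt)
    (PySem.Dict.empty : PySem.Dict String Int)]
  simp [pvColUpd]

-- ===== VERDICT (by name: the statement is the Claim_ definition above) =====
theorem count_conditional_spec : Claim_equal_count_conditional := by
  intro lines _hdom hpre
  obtain ⟨h0, hlenall⟩ := hpre
  cases lines with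
  | nil => exact absurd rfl h0
  | cons l0 rest =>
    simp only [List.headI_cons] at h0 hlenall
    have hlen1 : 1 ≤ l0.length := by
      cases l0 with
      | nil => exact absurd rfl h0
      | cons a b => simp
    unfold Spec_count_conditional
    have hhead : PySem.List.pyGetD (l0 :: rest) (0 : Int) ([] : List String) = l0 := by
      simpa using PySem.List.pyGetD_ofNat' (l0 :: rest) 0 []
    simp only [count_conditional, count_conditional_alt, get_field_category, hhead]
    rw [pv_foldA_canonical ((l0.length : Int) - 1) (l0 :: rest) PySem.Dict.empty
      PySem.Dict.nodup_keys_empty]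
    have hA := pv_items_foldl_modify (l0 :: rest) (pvClsOf ((l0.length : Int) - 1))
      PySem.Dict.empty pvLineUpd
    rw [hA]
    have hB := pv_items_foldl_modify (l0 :: rest)
      (fun line => PySem.List.pyGetD line ((l0.length : Int) - 1) "")
      ([] : List (List String)) (fun line rows => rows ++ [line])
    simp only [] at hB
    rw [hB]
    simp only [pvClsOf]
    rw [List.map_map, List.map_map]
    apply List.map_congr_left
    intro cls hcls
    have hclsmem := (PySem.Set.mem_ofList _ _).mp hcls
    obtain ⟨line0, hline0, hline0cls⟩ := List.mem_map.mp hclsmem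
    simp only [pvClsOf] at hline0cls
    simp only [Function.comp_apply]
    rw [PySem.List.foldl_append_singleton_eq_self, List.nil_append]
    have hne : (l0 :: rest).filter
        (fun line => PySem.List.pyGetD line ((l0.length : Int) - 1) "" == cls) ≠ [] := by
      apply List.ne_nil_of_mem (a := line0)
      exact List.mem_filter.mpr ⟨hline0, by simp [hline0cls]⟩
    have hlenr : ∀ row ∈ (l0 :: rest).filter
        (fun line => PySem.List.pyGetD line ((l0.length : Int) - 1) "" == cls), 1 ≤ row.length := by
      intro row hrow
      have hrow' := List.mem_of_mem_filter hrow
      have h1 := hlenall row hrow'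
      omega
    have hpc := pv_per_class _ hne hlenr
    simp only [Prod.mk.injEq]
    exact ⟨by trivial, hpc⟩
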